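-- pv_equiv track=rewrite | github.com/monisjaved/Facebook-Hacker-Cup | Qualification/lazyLoader.py | numberOfDays
-- ===== SOURCE A (Python) =====
-- def numberOfDays(arr):
-- 	arr = sorted(arr)
-- 	n = 0
-- 	while len(arr) > 0:
-- 		k = arr[-1]
-- 		w = k
-- 		del arr[-1]
-- 		while w <= 50:
-- 			try:
-- 				del arr[0]
-- 				w += k
-- 			except:
-- 				break
-- 		if w > 50:
-- 			n += 1
-- 	return n
-- ===== SOURCE B (Python) =====
-- def numberOfDays(arr):
--     s = sorted(arr)
--     lo, hi, n = 0, len(s) - 1, 0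
--     while lo <= hi:
--         k = s[hi]
--         if k <= 0:
--             break
--         hi -= 1
--         need = 50 // k  # extra items from the front so that k*(need+1) > 50
--         if hi - lo + 1 >= need:
--             lo += need
--             n += 1
--         else:
--             break
--     return n
-- ===== Notes on version B (the rewrite author's own statement) =====
-- stated objective: faster
-- what changed: Replace A's repeated del arr[0]/del arr[-1] on a mutating list (each front deletion O(n)) and its inner accumulation loop by two pointers over the sorted array with the number of needed front items computed arithmetically as 50//k.
import Mathlib
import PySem

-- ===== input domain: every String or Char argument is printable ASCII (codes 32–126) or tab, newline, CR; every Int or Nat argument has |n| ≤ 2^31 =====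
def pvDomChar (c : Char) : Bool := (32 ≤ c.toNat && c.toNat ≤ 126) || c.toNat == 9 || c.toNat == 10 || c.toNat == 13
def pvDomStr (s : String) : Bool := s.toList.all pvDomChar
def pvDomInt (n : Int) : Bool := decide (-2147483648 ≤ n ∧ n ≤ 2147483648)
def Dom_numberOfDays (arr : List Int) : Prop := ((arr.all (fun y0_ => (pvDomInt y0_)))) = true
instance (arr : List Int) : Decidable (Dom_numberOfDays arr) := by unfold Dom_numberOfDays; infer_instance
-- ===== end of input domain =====

-- B replaces A's destructive front/back deletions and inner accumulation loop by two
-- pointers over the sorted array, computing the needed front items arithmetically as 50 // k.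

-- ===== PORT A =====
-- inner loop of A: 'while w <= 50: del arr[0]; w += k'  (break when arr is empty)
def pvInnerA (k : Int) (w : Int) (arr : List Int) : Int × List Int :=
  match arr with
  | [] => (w, [])
  | x :: rest => if w ≤ 50 then pvInnerA k (w + k) rest else (w, x :: rest)

theorem pvInnerA_len (k w : Int) (arr : List Int) :
    (pvInnerA k w arr).2.length ≤ arr.length := by
  induction arr generalizing w with
  | nil => simp [pvInnerA]
  | cons x rest ih =>
    simp only [pvInnerA]
    split
    · exact le_trans (ih _) (by simp)
    · simp

-- outer 'while len(arr) > 0' loop of A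
def pvOuterA (arr : List Int) (n : Int) : Int :=
  if hne : arr = [] then n
  else
    let k := arr.getLast hne
    let p := pvInnerA k k arr.dropLast
    pvOuterA p.2 (if p.1 > 50 then n + 1 else n)
termination_by arr.length
decreasing_by
  have h1 := pvInnerA_len (arr.getLast hne) (arr.getLast hne) arr.dropLast
  have h2 : arr.dropLast.length < arr.length := by
    cases arr with
    | nil => exact absurd rfl hne
    | cons a l => simp [List.length_dropLast]
  omega

def numberOfDays (arr : List Int) : Int :=
  pvOuterA (PySem.List.sorted arr (fun x => x) false) 0

-- ===== PORT B =====
-- two-pointer loop of Source B; s[hi] is always in range when it is read (0 ≤ lo ≤ hi < len s)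
def pvLoopB (s : List Int) (lo hi n : Int) : Int :=
  if lo ≤ hi then
    let k := (PySem.List.pyGet? s hi).getD 0
    if k ≤ 0 then n
    else
      let hi' := hi - 1
      let need := PySem.Int.floordiv 50 k
      if hi' - lo + 1 ≥ need then pvLoopB s (lo + need) hi' (n + 1)
      else n
  else n
termination_by (hi + 1 - lo).toNat
decreasing_by
  have hk : (0:Int) < (PySem.List.pyGet? s hi).getD 0 := by omega
  have hne : 0 ≤ PySem.Int.floordiv 50 ((PySem.List.pyGet? s hi).getD 0) :=
    Int.fdiv_nonneg (by omega) (le_of_lt hk)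
  omega

def numberOfDays_alt (arr : List Int) : Int :=
  let s := PySem.List.sorted arr (fun x => x) false
  pvLoopB s 0 ((s.length : Int) - 1) 0

-- ===== PRECONDITION & SPEC =====
def Spec_numberOfDays (arr : List Int) (out : Int) : Prop := out = numberOfDays_alt arr
instance (arr : List Int) (out : Int) : Decidable (Spec_numberOfDays arr out) := by unfold Spec_numberOfDays; infer_instance

-- ===== CLAIM (what is proved, stated in full; the proofs are below) =====
def Claim_equal_numberOfDays : Prop := ∀ (arr : List Int), Dom_numberOfDays arr → Spec_numberOfDays arr (numberOfDays arr)

-- ===== LEMMAS AND PROOFS =====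

theorem pvFloordiv_eq_fdiv : PySem.Int.floordiv = Int.fdiv := rfl

-- A's inner loop with a non-positive k consumes the whole list and never exceeds 50.
theorem pvInnerA_nonpos (k w : Int) (arr : List Int) (hk : k ≤ 0) (hw : w ≤ 50) :
    pvInnerA k w arr = (w + k * arr.length, []) := by
  induction arr generalizing w with
  | nil => simp [pvInnerA]
  | cons x rest ih =>
    simp only [pvInnerA, if_pos hw]
    rw [ih (w + k) (by omega)]
    simp only [List.length_cons, Prod.mk.injEq]
    refine ⟨by push_cast; ring, trivial⟩

-- A's inner loop with an over-50 starting weight returns immediately.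
theorem pvInnerA_gt50 (k w : Int) (arr : List Int) (hw : 50 < w) :
    pvInnerA k w arr = (w, arr) := by
  cases arr with
  | nil => simp [pvInnerA]
  | cons x rest => simp [pvInnerA, if_neg (by omega : ¬ w ≤ 50)]

-- A's inner loop with positive k: drops min ((50-w)//k + 1) len elements.
theorem pvInnerA_pos (k : Int) (hk : 0 < k) (w : Int) (arr : List Int) (hw : w ≤ 50) :
    pvInnerA k w arr =
      (w + k * (min (Int.fdiv (50 - w) k + 1) (arr.length : Int)),
       arr.drop (min (Int.fdiv (50 - w) k + 1) (arr.length : Int)).toNat) := by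
  induction arr generalizing w with
  | nil =>
    have hfd0 : 0 ≤ Int.fdiv (50 - w) k := Int.fdiv_nonneg (by omega) (le_of_lt hk)
    simp [pvInnerA]; omega
  | cons x rest ih =>
    have hfd0 : 0 ≤ Int.fdiv (50 - w) k := Int.fdiv_nonneg (by omega) (le_of_lt hk)
    simp only [pvInnerA, if_pos hw]
    by_cases hwk : w + k ≤ 50
    · rw [ih (w + k) hwk]
      have hfd0' : 0 ≤ Int.fdiv (50 - (w + k)) k := Int.fdiv_nonneg (by omega) (le_of_lt hk)
      have hstep : Int.fdiv (50 - w) k = Int.fdiv (50 - (w + k)) k + 1 := by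
        have h2 : 50 - w = (50 - (w + k)) + 1 * k := by ring
        rw [h2, Int.add_mul_fdiv_right _ _ (ne_of_gt hk)]
      have hmin : min (Int.fdiv (50 - w) k + 1) (((x :: rest).length : Int))
          = min (Int.fdiv (50 - (w + k)) k + 1) ((rest.length : Int)) + 1 := by
        rw [hstep]; simp only [List.length_cons]; push_cast; omega
      rw [hmin]
      have ht : (min (Int.fdiv (50 - (w + k)) k + 1) ((rest.length : Int)) + 1).toNat
          = (min (Int.fdiv (50 - (w + k)) k + 1) ((rest.length : Int))).toNat + 1 := by omega
      simp only [Prod.mk.injEq]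
      refine ⟨by ring, ?_⟩
      rw [ht, List.drop_succ_cons]
    · -- w + k > 50 : exactly one element is taken from the front
      have hfd : Int.fdiv (50 - w) k = 0 := Int.fdiv_eq_zero_of_lt (by omega) (by omega)
      have hm : min (Int.fdiv (50 - w) k + 1) (((x :: rest).length : Int)) = 1 := by
        rw [hfd]; simp only [List.length_cons]; push_cast; omega
      rw [hm, pvInnerA_gt50 k (w + k) rest (by omega)]
      simp only [Prod.mk.injEq]
      refine ⟨by ring, by simp⟩

-- slice view of B's pointer pair
def pvSlice (s : List Int) (lo hi : Int) : List Int :=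
  (s.drop lo.toNat).take (hi + 1 - lo).toNat

theorem pvSlice_length (s : List Int) (lo hi : Int) (h0 : 0 ≤ lo) (h1 : hi < s.length) :
    (pvSlice s lo hi).length = (hi + 1 - lo).toNat := by
  simp only [pvSlice, List.length_take, List.length_drop]
  omega

-- over-50 threshold facts about 50 // k
theorem pvNeed_mul_gt (k : Int) (hk : 0 < k) : 50 < k * (Int.fdiv 50 k + 1) := by
  have h1 := Int.mul_fdiv_add_fmod 50 k
  have h2 := Int.fmod_lt_of_pos 50 hk
  nlinarith
theorem pvNeed_mul_le (k m : Int) (hk : 0 < k) (hm : m ≤ Int.fdiv 50 k) : k * m ≤ 50 := by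
  have h1 := Int.mul_fdiv_add_fmod 50 k
  have h2 := Int.fmod_nonneg_of_pos 50 hk
  nlinarith

-- main bridge: B's index loop equals A's outer loop on the corresponding slice
theorem pvBridge (N : Nat) (s : List Int) (lo hi n : Int) (hN : (hi + 1 - lo).toNat = N)
    (h0 : 0 ≤ lo) (h1 : hi < s.length) :
    pvLoopB s lo hi n = pvOuterA (pvSlice s lo hi) n := by
  induction N using Nat.strong_induction_on generalizing lo hi n with
  | _ N ih =>
  by_cases hle : lo ≤ hi
  case neg =>
    rw [pvLoopB, if_neg hle]
    have he : pvSlice s lo hi = [] := by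
      simp only [pvSlice, List.take_eq_nil_iff]
      omega
    rw [he, pvOuterA]; simp
  case pos =>
  have hhi : 0 ≤ hi := le_trans h0 hle
  have hlen : (pvSlice s lo hi).length = (hi + 1 - lo).toNat := pvSlice_length s lo hi h0 h1
  have hne : pvSlice s lo hi ≠ [] := by
    intro h; rw [h] at hlen; simp at hlen; omega
  have hgetk : (PySem.List.pyGet? s hi).getD 0 = s[hi.toNat]'(by omega) := by
    rw [PySem.List.pyGet?_eq_some_getElem s hhi h1]; rfl
  set k : Int := s[hi.toNat]'(by omega) with hkdef
  -- the last element of the slice is s[hi]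
  have hlast : (pvSlice s lo hi).getLast hne = k := by
    rw [List.getLast_eq_getElem]
    simp only [pvSlice]
    rw [List.getElem_take, List.getElem_drop]
    congr 1
    simp only [pvSlice, List.length_take, List.length_drop] at hlen ⊢
    omega
  -- the slice without its last element is the slice (lo, hi-1)
  have hdl : (pvSlice s lo hi).dropLast = pvSlice s lo (hi - 1) := by
    rw [List.dropLast_eq_take, hlen]
    simp only [pvSlice, List.take_take]
    congr 1
    omega
  have hdlen : (pvSlice s lo (hi - 1)).length = (hi - lo).toNat := by
    rw [pvSlice_length s lo (hi - 1) h0 (by omega)]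
    congr 1; omega
  -- unfold one step of A
  have hA : pvOuterA (pvSlice s lo hi) n
      = pvOuterA (pvInnerA k k (pvSlice s lo (hi - 1))).2
          (if (pvInnerA k k (pvSlice s lo (hi - 1))).1 > 50 then n + 1 else n) := by
    rw [pvOuterA]
    rw [dif_neg hne]
    rw [hlast, hdl]
  -- unfold one step of B
  rw [pvLoopB, if_pos hle, hgetk]
  change (if k ≤ 0 then n
    else if hi - 1 - lo + 1 ≥ PySem.Int.floordiv 50 k then
      pvLoopB s (lo + PySem.Int.floordiv 50 k) (hi - 1) (n + 1)
    else n) = _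
  by_cases hkpos : k ≤ 0
  · -- A consumes everything without ever exceeding 50; B stops
    rw [if_pos hkpos, hA,
        pvInnerA_nonpos k k (pvSlice s lo (hi - 1)) hkpos (by omega)]
    have : ¬ (k + k * ((pvSlice s lo (hi - 1)).length : Int) > 50) := by
      have hq : (0:Int) ≤ ((pvSlice s lo (hi - 1)).length : Int) := by positivity
      nlinarith
    rw [if_neg this, pvOuterA]; simp
  · rw [if_neg hkpos]
    have hk : 0 < k := by omega
    rw [pvFloordiv_eq_fdiv]
    have hneed0 : 0 ≤ Int.fdiv 50 k := Int.fdiv_nonneg (by omega) (le_of_lt hk)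
    set need : Int := Int.fdiv 50 k with hneeddef
    -- the slice(lo, hi-1) dropped by j elements is slice(lo+j, hi-1)
    have hdrop : ∀ j : Int, 0 ≤ j →
        (pvSlice s lo (hi - 1)).drop j.toNat = pvSlice s (lo + j) (hi - 1) := by
      intro j hj
      simp only [pvSlice, List.drop_take, List.drop_drop]
      congr 1
      · omega
      · congr 1; omega
    by_cases hbig : 50 < k
    · -- day needs only the top element
      have hfd : need = 0 := by
        rw [hneeddef]; exact Int.fdiv_eq_zero_of_lt (by omega) (by omega)
      rw [if_pos (by omega), hA, pvInnerA_gt50 k k _ hbig, if_pos (by omega : k > 50)]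
      rw [hfd, add_zero]
      have := hdrop 0 le_rfl
      rw [ih (hi - lo).toNat (by omega) lo (hi - 1) (n + 1) (by omega) h0 (by omega)]
    · -- k ≤ 50 : A's inner loop drops min need (length) items
      have hc := pvInnerA_pos k hk k (pvSlice s lo (hi - 1)) (by omega)
      have hstep : Int.fdiv (50 - k) k + 1 = need := by
        have h3 := Int.add_mul_fdiv_right (50 - k) 1 (ne_of_gt hk)
        have h4 : 50 - k + 1 * k = (50 : Int) := by ring
        rw [h4] at h3
        rw [hneeddef]; omega
      rw [hdlen] at hc
      rw [hstep] at hc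
      by_cases havail : hi - 1 - lo + 1 ≥ need
      · -- enough items at the front: a full day
        have hmin : min need (((hi - lo).toNat : Int)) = need := by omega
        rw [hmin] at hc
        rw [if_pos havail, hA, hc]
        rw [if_pos (by have := pvNeed_mul_gt k hk; rw [← hneeddef] at this; nlinarith : k + k * need > 50)]
        rw [hdrop need hneed0]
        exact (ih (hi - lo - need).toNat (by omega) (lo + need) (hi - 1) (n + 1)
          (by omega) (by omega) (by omega)).symm ▸ rfl
      · -- not enough: A consumes the rest without reaching 51, B stops
        have hmin : min need (((hi - lo).toNat : Int)) = ((hi - lo).toNat : Int) := by omega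
        rw [hmin] at hc
        rw [if_neg havail, hA, hc]
        have hle50 : ¬ (k + k * (((hi - lo).toNat : Int)) > 50) := by
          have := pvNeed_mul_le k (((hi - lo).toNat : Int) + 1) hk (by omega)
          nlinarith
        rw [if_neg hle50]
        have hall : (pvSlice s lo (hi - 1)).drop ((((hi - lo).toNat : Int)).toNat) = [] := by
          apply List.drop_eq_nil_of_le
          rw [hdlen]; omega
        rw [hall, pvOuterA]; simp

-- ===== VERDICT (by name: the statement is the Claim_ definition above) =====
theorem numberOfDays_spec : Claim_equal_numberOfDays := by
  intro arr _
  unfold Spec_numberOfDays numberOfDays numberOfDays_alt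
  set s := PySem.List.sorted arr (fun x => x) false with hs
  rw [pvBridge ((s.length : Int) - 1 + 1 - 0).toNat s 0 ((s.length : Int) - 1) 0 rfl (by omega) (by omega)]
  congr 1
  simp [pvSlice]
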